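-- pv_equiv track=rewrite | github.com/BoothGroup/ebcc | ebcc/ansatz.py | identifity_to_name
-- ===== SOURCE A (Python) =====
-- def identifity_to_name(iden):
--     """
--     Convert an ansatz identifier to a name. Inverse operation of
--     `name_to_identifier`.
--
--     Parameters
--     ----------
--     iden : str
--         Identifier for the ansatz.
--
--     Returns
--     -------
--     name : str
--         Name of the ansatz.
--
--     Examples
--     --------
--     >>> identifier_to_name("CCSDxTx")
--     CCSD(T)
--     >>> identifier_to_name("CCSD_SD_1_2")
--     CCSD-SD-1-2
--     """
--
--     name = iden.replace("-", "_")
--     while "x" in name: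
--         name = name.replace("x", "(", 1).replace("x", ")", 1)
--     while "y" in name:
--         name = name.replace("y", "(", 1).replace("y", ")", 1)
--     name = name.replace("p", "'")
--
--     return name
-- ===== SOURCE B (Python) =====
-- def identifity_to_name(iden):
--     out = []
--     x_open = False
--     y_open = False
--     for c in iden:
--         if c == '-':
--             out.append('_')
--         elif c == 'x':
--             out.append(')' if x_open else '(')
--             x_open = not x_open
--         elif c == 'y':
--             out.append(')' if y_open else '(')
--             y_open = not y_open
--         elif c == 'p':
--             out.append("'")
--         else:
--             out.append(c)
--     return ''.join(out)
-- ===== Notes on version B (the rewrite author's own statement) =====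
-- stated objective: alternative
-- what changed: Replaces A's repeated first-occurrence str.replace scans inside two while-loops by a single left-to-right pass keeping two independent parenthesis toggles for 'x' and 'y'.
import Mathlib
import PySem

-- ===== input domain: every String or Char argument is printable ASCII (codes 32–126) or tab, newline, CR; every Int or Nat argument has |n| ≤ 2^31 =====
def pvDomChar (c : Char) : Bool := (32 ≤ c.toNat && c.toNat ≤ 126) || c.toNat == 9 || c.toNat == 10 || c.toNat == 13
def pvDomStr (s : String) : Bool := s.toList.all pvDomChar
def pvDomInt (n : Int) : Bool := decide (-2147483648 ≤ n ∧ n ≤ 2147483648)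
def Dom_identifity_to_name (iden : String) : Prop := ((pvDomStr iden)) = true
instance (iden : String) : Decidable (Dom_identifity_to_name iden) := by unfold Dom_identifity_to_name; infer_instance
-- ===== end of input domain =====

-- B replaces A's repeated first-occurrence .replace scans (two while-loops) by one
-- left-to-right pass with two independent '('/')' toggles for 'x' and 'y' (objective: alternative single-pass algorithm).


-- ===== PORT A =====
-- Python's str.replace(old, new, 1) for single characters: replace the FIRST occurrence (exact).
def pvReplace1 (c r : Char) : List Char → List Char
  | [] => []
  | a :: t => if a = c then r :: t else a :: pvReplace1 c r t

-- Python's str.replace(old, new) for single characters replaces every occurrence (exact).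
def pvReplaceAll (c r : Char) (l : List Char) : List Char :=
  l.map (fun a => if a = c then r else a)

lemma pvReplace1_count_le (c r : Char) (h : r ≠ c) (l : List Char) :
    (pvReplace1 c r l).count c ≤ l.count c := by
  induction l with
  | nil => simp [pvReplace1]
  | cons a t ih =>
    by_cases ha : a = c
    · simp [pvReplace1, ha, List.count_cons, h]
    · simp only [pvReplace1, if_neg ha, List.count_cons]
      omega

lemma pvReplace1_count_lt (c r : Char) (h : r ≠ c) (l : List Char) (hm : c ∈ l) :
    (pvReplace1 c r l).count c < l.count c := by
  induction l with
  | nil => simp at hm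
  | cons a t ih =>
    by_cases ha : a = c
    · simp [pvReplace1, ha, List.count_cons, h]
    · have hm' : c ∈ t := by
        rcases List.mem_cons.mp hm with h1 | h1
        · exact absurd h1.symm ha
        · exact h1
      have := ih hm'
      simp only [pvReplace1, if_neg ha, List.count_cons]
      omega

-- 'while "x" in name: name = name.replace("x","(",1).replace("x",")",1)'
def pvXLoop (l : List Char) : List Char :=
  if h : 'x' ∈ l then pvXLoop (pvReplace1 'x' ')' (pvReplace1 'x' '(' l)) else l
termination_by l.count 'x'
decreasing_by
  exact lt_of_le_of_lt
    (pvReplace1_count_le 'x' ')' (by decide) _)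
    (pvReplace1_count_lt 'x' '(' (by decide) l h)

-- 'while "y" in name: name = name.replace("y","(",1).replace("y",")",1)'
def pvYLoop (l : List Char) : List Char :=
  if h : 'y' ∈ l then pvYLoop (pvReplace1 'y' ')' (pvReplace1 'y' '(' l)) else l
termination_by l.count 'y'
decreasing_by
  exact lt_of_le_of_lt
    (pvReplace1_count_le 'y' ')' (by decide) _)
    (pvReplace1_count_lt 'y' '(' (by decide) l h)

def identifity_to_name (iden : String) : String :=
  String.mk (pvReplaceAll 'p' '\'' (pvYLoop (pvXLoop (pvReplaceAll '-' '_' iden.toList))))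

-- ===== PORT B =====
-- one pass, two independent toggles (B's loop, state = (x_open, y_open, output so far))
def pvOnePass (xo yo : Bool) : List Char → List Char
  | [] => []
  | c :: t =>
    if c = '-' then '_' :: pvOnePass xo yo t
    else if c = 'x' then (if xo then ')' else '(') :: pvOnePass (!xo) yo t
    else if c = 'y' then (if yo then ')' else '(') :: pvOnePass xo (!yo) t
    else if c = 'p' then '\'' :: pvOnePass xo yo t
    else c :: pvOnePass xo yo t

def identifity_to_name_alt (iden : String) : String :=
  String.mk (pvOnePass false false iden.toList)

-- ===== PRECONDITION & SPEC =====
def Spec_identifity_to_name (iden : String) (out : String) : Prop := out = identifity_to_name_alt iden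
instance (iden : String) (out : String) : Decidable (Spec_identifity_to_name iden out) := by unfold Spec_identifity_to_name; infer_instance

-- ===== CLAIM (what is proved, stated in full; the proofs are below) =====
def Claim_equal_identifity_to_name : Prop := ∀ (iden : String), Dom_identifity_to_name iden → Spec_identifity_to_name iden (identifity_to_name iden)

-- ===== LEMMAS AND PROOFS =====

-- single-character toggle pass: each occurrence of c becomes '(' / ')' alternately
def pvTg (c : Char) (b : Bool) : List Char → List Char
  | [] => []
  | a :: t => if a = c then (if b then ')' else '(') :: pvTg c (!b) t else a :: pvTg c b t

lemma pvTg_not_mem (c : Char) (b : Bool) (l : List Char) (h : c ∉ l) : pvTg c b l = l := by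
  induction l generalizing b with
  | nil => rfl
  | cons a t ih =>
    have ha : a ≠ c := fun e => h (by simp [e])
    simp [pvTg, ha, ih b (fun hm => h (by simp [hm]))]

lemma pvTg_append (c : Char) (b : Bool) (p l : List Char) (h : c ∉ p) :
    pvTg c b (p ++ l) = p ++ pvTg c b l := by
  induction p with
  | nil => rfl
  | cons a t ih =>
    have ha : a ≠ c := fun e => h (by simp [e])
    simp [pvTg, ha, ih (fun hm => h (by simp [hm]))]

lemma pvReplace1_not_mem (c r : Char) (l : List Char) (h : c ∉ l) : pvReplace1 c r l = l := by
  induction l with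
  | nil => rfl
  | cons a t ih =>
    have ha : a ≠ c := fun e => h (by simp [e])
    simp [pvReplace1, ha, ih (fun hm => h (by simp [hm]))]

lemma pvReplace1_append (c r : Char) (p l : List Char) (h : c ∉ p) :
    pvReplace1 c r (p ++ l) = p ++ pvReplace1 c r l := by
  induction p with
  | nil => rfl
  | cons a t ih =>
    have ha : a ≠ c := fun e => h (by simp [e])
    simp [pvReplace1, ha, ih (fun hm => h (by simp [hm]))]

lemma pvFirst_split (c : Char) (l : List Char) (h : c ∈ l) :
    ∃ p q, l = p ++ c :: q ∧ c ∉ p := by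
  induction l with
  | nil => simp at h
  | cons a t ih =>
    by_cases ha : a = c
    · exact ⟨[], t, by simp [ha], by simp⟩
    · have hm : c ∈ t := by
        rcases List.mem_cons.mp h with h1 | h1
        · exact absurd h1.symm ha
        · exact h1
      obtain ⟨p, q, he, hp⟩ := ih hm
      refine ⟨a :: p, q, by simp [he], ?_⟩
      simp [hp]
      exact fun e => ha e.symm

-- one unrolled iteration of the while-loop: count strictly drops and pvTg-value is preserved
lemma pvStep (c : Char) (h1 : ('(' : Char) ≠ c) (h2 : (')' : Char) ≠ c)
    (l : List Char) (hm : c ∈ l) :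
    (pvReplace1 c ')' (pvReplace1 c '(' l)).count c < l.count c ∧
      pvTg c false (pvReplace1 c ')' (pvReplace1 c '(' l)) = pvTg c false l := by
  obtain ⟨p, q, he, hp⟩ := pvFirst_split c l hm
  subst he
  have h1' : pvReplace1 c '(' (p ++ c :: q) = p ++ '(' :: q := by
    rw [pvReplace1_append c '(' p _ hp]; simp [pvReplace1]
  by_cases hq : c ∈ q
  · obtain ⟨p2, q2, he2, hp2⟩ := pvFirst_split c q hq
    subst he2
    have hnp : c ∉ p ++ '(' :: p2 := by
      simp [hp, hp2, Ne.symm h1]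
    have h2' : pvReplace1 c ')' (p ++ '(' :: p2 ++ c :: q2) = p ++ '(' :: p2 ++ ')' :: q2 := by
      have := pvReplace1_append c ')' (p ++ '(' :: p2) (c :: q2) hnp
      simpa [pvReplace1] using this
    constructor
    · rw [h1']
      have h2'' : pvReplace1 c ')' (p ++ '(' :: (p2 ++ c :: q2)) = p ++ '(' :: p2 ++ ')' :: q2 := by
        simpa using h2'
      rw [h2'']
      have hcp : p.count c = 0 := List.count_eq_zero.mpr hp
      have hcp2 : p2.count c = 0 := List.count_eq_zero.mpr hp2
      simp [List.count_append, List.count_cons, hcp, hcp2, h1, h2, Ne.symm h1, Ne.symm h2]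
    · rw [h1']
      have h2'' : pvReplace1 c ')' (p ++ '(' :: (p2 ++ c :: q2)) = p ++ '(' :: p2 ++ ')' :: q2 := by
        simpa using h2'
      rw [h2'']
      have hnp' : c ∉ (p ++ '(' :: p2) ++ [')'] := by
        simp [hp, hp2, Ne.symm h1, Ne.symm h2]
      have L : pvTg c false (((p ++ '(' :: p2) ++ [')']) ++ q2) = ((p ++ '(' :: p2) ++ [')']) ++ pvTg c false q2 :=
        pvTg_append c false _ q2 hnp'
      have e2 : pvTg c true (p2 ++ c :: q2) = p2 ++ ')' :: pvTg c false q2 := by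
        rw [pvTg_append c true p2 _ hp2]; simp [pvTg]
      have R : pvTg c false (p ++ c :: (p2 ++ c :: q2)) = p ++ '(' :: p2 ++ ')' :: pvTg c false q2 := by
        rw [pvTg_append c false p _ hp]
        simp [pvTg, e2]
      simp only [List.append_assoc, List.cons_append, List.nil_append] at L R ⊢
      rw [L, R]
  · have hnp : c ∉ p ++ '(' :: q := by simp [hp, hq, Ne.symm h1]
    have h2' : pvReplace1 c ')' (p ++ '(' :: q) = p ++ '(' :: q := pvReplace1_not_mem c ')' _ hnp
    constructor
    · rw [h1', h2']
      have hcp : p.count c = 0 := List.count_eq_zero.mpr hp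
      have hcq : q.count c = 0 := List.count_eq_zero.mpr hq
      simp [List.count_append, List.count_cons, hcp, hcq, h1, Ne.symm h1]
    · rw [h1', h2', pvTg_not_mem c false _ hnp, pvTg_append c false p _ hp]
      simp [pvTg, pvTg_not_mem c true q hq]

lemma pvXLoop_eq (l : List Char) : pvXLoop l = pvTg 'x' false l := by
  induction hn : l.count 'x' using Nat.strong_induction_on generalizing l with
  | _ n ih =>
    by_cases hm : 'x' ∈ l
    · obtain ⟨hlt, heq⟩ := pvStep 'x' (by decide) (by decide) l hm
      rw [pvXLoop, dif_pos hm, ih _ (hn ▸ hlt) _ rfl, heq]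
    · rw [pvXLoop, dif_neg hm, pvTg_not_mem 'x' false l hm]

lemma pvYLoop_eq (l : List Char) : pvYLoop l = pvTg 'y' false l := by
  induction hn : l.count 'y' using Nat.strong_induction_on generalizing l with
  | _ n ih =>
    by_cases hm : 'y' ∈ l
    · obtain ⟨hlt, heq⟩ := pvStep 'y' (by decide) (by decide) l hm
      rw [pvYLoop, dif_pos hm, ih _ (hn ▸ hlt) _ rfl, heq]
    · rw [pvYLoop, dif_neg hm, pvTg_not_mem 'y' false l hm]

lemma pvOnePass_eq (l : List Char) (bx byy : Bool) :
    pvOnePass bx byy l =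
      pvReplaceAll 'p' '\'' (pvTg 'y' byy (pvTg 'x' bx (pvReplaceAll '-' '_' l))) := by
  induction l generalizing bx byy with
  | nil => rfl
  | cons a t ih =>
    by_cases hd : a = '-'
    · simp [pvOnePass, pvReplaceAll, pvTg, hd, ih]
    · by_cases hx : a = 'x'
      · simp [pvOnePass, pvReplaceAll, pvTg, hx, ih]
        cases bx <;> simp
      · by_cases hy : a = 'y'
        · simp [pvOnePass, pvReplaceAll, pvTg, hy, ih]
          cases byy <;> simp
        · by_cases hp : a = 'p'
          · simp [pvOnePass, pvReplaceAll, pvTg, hp, ih]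
          · simp [pvOnePass, pvReplaceAll, pvTg, hd, hx, hy, hp, ih]

-- ===== VERDICT (by name: the statement is the Claim_ definition above) =====
theorem identifity_to_name_spec : Claim_equal_identifity_to_name := by
  intro iden _
  unfold Spec_identifity_to_name identifity_to_name identifity_to_name_alt
  rw [pvOnePass_eq, pvXLoop_eq, pvYLoop_eq]
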